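-- pv_equiv track=rewrite | github.com/JohnJiang12138/CMRP | REINFORCE/trainer_kg.py | create_q2ent
-- ===== SOURCE A (Python) =====
-- def create_q2ent(ent2q):
--     q2ent = {}
--     for ent_id, qid_list in ent2q.items():
--         for qid in qid_list:
--             if qid not in q2ent:
--                 q2ent[qid] = [ent_id]
--             else:
--                 if ent_id not in q2ent[qid]:
--                     q2ent[qid].append(ent_id)
--     return q2ent
-- ===== SOURCE B (Python) =====
-- def create_q2ent(ent2q):
--     # Different decomposition: first compute the qid key order (first occurrence
--     # across the flattened qid lists), then build each qid's entity list by an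
--     # independent filtering scan of the whole input, de-duplicated in order.
--     items = list(ent2q.items())
--     qid_order = list(dict.fromkeys(q for _, qs in items for q in qs))
--     return {q: list(dict.fromkeys(e for e, qs in items if q in qs))
--             for q in qid_order}
-- ===== Notes on version B (the rewrite author's own statement) =====
-- stated objective: alternative
-- what changed: A builds the inverted dict incrementally in one fused loop (create key / membership-checked append per occurrence); B first computes the qid key order by de-duplicating the flattened qid lists, then builds each qid's value independently by filtering the whole input for entries containing that qid and de-duplicating the entity ids.
import Mathlib
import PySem

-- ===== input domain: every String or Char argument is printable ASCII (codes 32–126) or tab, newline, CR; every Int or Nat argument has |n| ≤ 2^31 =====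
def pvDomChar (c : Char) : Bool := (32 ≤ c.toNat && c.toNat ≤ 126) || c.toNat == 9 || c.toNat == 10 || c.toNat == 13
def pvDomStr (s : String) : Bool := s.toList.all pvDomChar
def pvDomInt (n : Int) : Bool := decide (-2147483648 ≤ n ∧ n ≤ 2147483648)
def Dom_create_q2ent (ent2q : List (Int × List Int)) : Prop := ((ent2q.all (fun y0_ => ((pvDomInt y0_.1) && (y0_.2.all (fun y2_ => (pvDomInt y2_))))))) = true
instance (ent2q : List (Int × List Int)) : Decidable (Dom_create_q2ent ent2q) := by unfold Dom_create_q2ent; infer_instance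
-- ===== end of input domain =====

-- B replaces A's single incremental dict-building loop by two independent stages:
-- it computes the qid key order from the flattened qid lists, then fills each
-- qid's value by its own filtering scan of the whole input. Return-value equivalence.

-- ===== PORT A =====
-- one qid of A's inner loop: if qid not in q2ent: q2ent[qid] = [ent_id]
--                            elif ent_id not in q2ent[qid]: q2ent[qid].append(ent_id)
def stepA (ent_id : Int) (q2ent : PySem.Dict Int (List Int)) (qid : Int) : PySem.Dict Int (List Int) :=
  if q2ent.contains qid = false then q2ent.insert qid [ent_id]
  else if ent_id ∈ q2ent.getD qid [] then q2ent
  else q2ent.insert qid (q2ent.getD qid [] ++ [ent_id])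

def create_q2ent (ent2q : List (Int × List Int)) : List (Int × List Int) :=
  (ent2q.foldl (fun q2ent p => p.2.foldl (stepA p.1) q2ent) PySem.Dict.empty).items

-- ===== PORT B =====
-- qid_order = list(dict.fromkeys(flattened qids)); then a dict comprehension whose
-- value for q filters the whole item list and de-duplicates the entity ids.
def create_q2ent_alt (ent2q : List (Int × List Int)) : List (Int × List Int) :=
  (PySem.List.dedup (ent2q.flatMap (fun p => p.2))).map
    (fun q => (q, PySem.List.dedup ((ent2q.filter (fun p => decide (q ∈ p.2))).map (fun p => p.1))))

-- ===== PRECONDITION & SPEC =====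
def Spec_create_q2ent (ent2q : List (Int × List Int)) (out : List (Int × List Int)) : Prop := out = create_q2ent_alt ent2q
instance (ent2q : List (Int × List Int)) (out : List (Int × List Int)) : Decidable (Spec_create_q2ent ent2q out) := by unfold Spec_create_q2ent; infer_instance

-- ===== CLAIM (what is proved, stated in full; the proofs are below) =====
def Claim_equal_create_q2ent : Prop := ∀ (ent2q : List (Int × List Int)), Dom_create_q2ent ent2q → Spec_create_q2ent ent2q (create_q2ent ent2q)

-- ===== LEMMAS AND PROOFS =====

-- the key order B computes
def pvK (l : List (Int × List Int)) : List Int := PySem.Set.ofList (l.flatMap (fun p => p.2))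
-- the value B computes for key q
def pvV (l : List (Int × List Int)) (q : Int) : List Int :=
  PySem.Set.ofList ((l.filter (fun p => decide (q ∈ p.2))).map (fun p => p.1))
-- abstract dict "keys K, value V k at key k"
def pvH (K : List Int) (V : Int → List Int) : PySem.Dict Int (List Int) :=
  PySem.Dict.mk (K.map (fun q => (q, V q)))

theorem pvH_congr (K : List Int) (V W : Int → List Int) (h : ∀ x ∈ K, V x = W x) :
    pvH K V = pvH K W :=
  congrArg PySem.Dict.mk (List.map_congr_left (fun x hx => by rw [h x hx]))

theorem contains_pvH (K : List Int) (V : Int → List Int) (q : Int) :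
    (pvH K V).contains q = K.any (· == q) := by
  rw [pvH, PySem.Dict.contains, List.any_map]; rfl

theorem any_beq_of_mem (K : List Int) (q : Int) (h : q ∈ K) : K.any (· == q) = true :=
  List.any_eq_true.2 ⟨q, h, by simp⟩

theorem any_beq_of_not_mem (K : List Int) (q : Int) (h : q ∉ K) : K.any (· == q) = false := by
  rw [List.any_eq_false]
  exact fun x hx hxq => h ((eq_of_beq hxq) ▸ hx)

theorem get?_pvH (K : List Int) (V : Int → List Int) (q : Int) (h : q ∈ K) :
    (pvH K V).get? q = some (V q) := by
  induction K with
  | nil => simp at h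
  | cons x t ih =>
    rw [pvH, List.map_cons, PySem.Dict.get?_mk_cons]
    by_cases hx : x = q
    · subst hx; simp
    · rw [if_neg (by simp [hx])]
      exact ih ((List.mem_cons.1 h).resolve_left (fun hh => hx hh.symm))

theorem getD_pvH (K : List Int) (V : Int → List Int) (q : Int) (h : q ∈ K) :
    (pvH K V).getD q [] = V q := by
  rw [PySem.Dict.getD_eq_get?_getD, get?_pvH K V q h]; rfl

theorem stepA_pvH (e q : Int) (K : List Int) (V : Int → List Int)
    (hV0 : ∀ x, x ∉ K → V x = []) :
    stepA e (pvH K V) q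
      = pvH (PySem.Set.add K q) (fun x => if x = q then PySem.Set.add (V x) e else V x) := by
  unfold stepA
  by_cases hq : q ∈ K
  · rw [contains_pvH, any_beq_of_mem K q hq,
        if_neg (by simp), getD_pvH K V q hq, PySem.Set.add_of_mem hq]
    by_cases he : e ∈ V q
    · rw [if_pos he]
      exact pvH_congr K _ _ (fun x hx => by
        by_cases hxq : x = q
        · subst hxq; rw [if_pos rfl, PySem.Set.add_of_mem he]
        · rw [if_neg hxq])
    · rw [if_neg he, PySem.Dict.insert,
          if_pos (by rw [contains_pvH]; exact any_beq_of_mem K q hq)]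
      refine congrArg PySem.Dict.mk ?_
      dsimp only [PySem.Dict.items, pvH]
      rw [List.map_map]
      refine List.map_congr_left (fun x hx => ?_)
      by_cases hxq : x = q
      · subst hxq
        simp only [Function.comp, beq_self_eq_true, if_pos]
        rw [PySem.Set.add_of_not_mem he]
      · simp only [Function.comp]
        rw [if_neg (by simp [hxq]), if_neg hxq]
  · rw [contains_pvH, any_beq_of_not_mem K q hq, if_pos rfl, PySem.Dict.insert,
        if_neg (by rw [contains_pvH, any_beq_of_not_mem K q hq]; simp),
        PySem.Set.add_of_not_mem hq]
    refine congrArg PySem.Dict.mk ?_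
    dsimp only [PySem.Dict.items, pvH]
    rw [List.map_append, List.map_cons, List.map_nil]
    congr 1
    · refine List.map_congr_left (fun x hx => ?_)
      rw [if_neg (fun hxq : x = q => hq (hxq ▸ hx))]
    · rw [if_pos rfl, hV0 q hq]
      rfl

theorem add_add_self (s : List Int) (e : Int) :
    PySem.Set.add (PySem.Set.add s e) e = PySem.Set.add s e :=
  PySem.Set.add_of_mem ((PySem.Set.mem_add _ _ _).2 (Or.inr rfl))

theorem foldl_stepA_pvH (e : Int) (qs : List Int) :
    ∀ (K : List Int) (V : Int → List Int), (∀ x, x ∉ K → V x = []) →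
      qs.foldl (stepA e) (pvH K V)
        = pvH (qs.foldl PySem.Set.add K)
              (fun x => if x ∈ qs then PySem.Set.add (V x) e else V x) := by
  induction qs with
  | nil =>
    intro K V _
    exact (pvH_congr K _ _ (fun x _ => by rw [if_neg (List.not_mem_nil)])).symm
  | cons q t ih =>
    intro K V hV0
    rw [List.foldl_cons, stepA_pvH e q K V hV0, List.foldl_cons]
    rw [ih (PySem.Set.add K q) _ (fun x hx => by
      have hxK : x ∉ K := fun h => hx ((PySem.Set.mem_add _ _ _).2 (Or.inl h))
      have hxq : x ≠ q := fun h => hx ((PySem.Set.mem_add _ _ _).2 (Or.inr h))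
      rw [if_neg hxq]; exact hV0 x hxK)]
    refine pvH_congr _ _ _ (fun x _ => ?_)
    by_cases hxt : x ∈ t
    · rw [if_pos hxt, if_pos (List.mem_cons.2 (Or.inr hxt))]
      by_cases hxq : x = q
      · rw [if_pos hxq, add_add_self]
      · rw [if_neg hxq]
    · rw [if_neg hxt]
      by_cases hxq : x = q
      · rw [if_pos hxq, if_pos (List.mem_cons.2 (Or.inl hxq))]
      · rw [if_neg hxq, if_neg (by simp [hxq, hxt])]

theorem pvV_zero (l : List (Int × List Int)) (x : Int) (hx : x ∉ pvK l) : pvV l x = [] := by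
  have hflat : x ∉ l.flatMap (fun p => p.2) := fun h =>
    hx ((PySem.Set.mem_ofList _ _).2 h)
  unfold pvV
  rw [List.filter_eq_nil_iff.2 (fun p hp => by
    simp only [decide_eq_true_eq]
    exact fun hxp => hflat (List.mem_flatMap.2 ⟨p, hp, hxp⟩))]
  rfl

theorem foldA_eq (l : List (Int × List Int)) :
    l.foldl (fun q2ent p => p.2.foldl (stepA p.1) q2ent) PySem.Dict.empty
      = pvH (pvK l) (pvV l) := by
  induction l using List.reverseRecOn with
  | nil => rfl
  | append_singleton l p ih =>
    rw [List.foldl_append, List.foldl_cons, List.foldl_nil, ih,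
        foldl_stepA_pvH p.1 p.2 (pvK l) (pvV l) (pvV_zero l)]
    have hK : p.2.foldl PySem.Set.add (pvK l) = pvK (l ++ [p]) := by
      unfold pvK
      rw [List.flatMap_append]
      simp only [List.flatMap_cons, List.flatMap_nil, List.append_nil]
      conv_rhs => rw [PySem.Set.ofList_eq_foldl, List.foldl_append]
      rw [← PySem.Set.ofList_eq_foldl]
    rw [hK]
    refine pvH_congr _ _ _ (fun x _ => ?_)
    unfold pvV
    rw [List.filter_append, List.map_append]
    by_cases hx : x ∈ p.2
    · rw [if_pos hx]
      have : List.filter (fun r => decide (x ∈ r.2)) [p] = [p] := by simp [hx]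
      rw [this, List.map_cons, List.map_nil, PySem.Set.ofList_append_singleton]
    · rw [if_neg hx]
      have : List.filter (fun r => decide (x ∈ r.2)) [p] = [] := by simp [hx]
      rw [this, List.map_nil, List.append_nil]

-- ===== VERDICT (by name: the statement is the Claim_ definition above) =====
theorem create_q2ent_spec : Claim_equal_create_q2ent := by
  intro ent2q _
  show create_q2ent ent2q = create_q2ent_alt ent2q
  unfold create_q2ent create_q2ent_alt
  rw [foldA_eq ent2q]
  dsimp only [pvH, PySem.Dict.items]
  simp only [PySem.List.dedup_eq_ofList, pvK, pvV]
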